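-- pv_equiv track=rewrite | github.com/tarunganesh2004/Leetcode | LC Mothly/2025/January/20th_jan.py | firstCompleteIndexBrute
-- ===== SOURCE A (Python) =====
-- def isCompleted(mat,r,c,m,n):
--     rowC=True
--     for j in range(n):
--         if mat[r][j]==0:
--             rowC=False
--             break
--     colC=True
--     for j in range(m):
--         if mat[j][c]==0:
--             colC=False
--             break
--     return rowC or colC
--
-- def firstCompleteIndexBrute(arr,mat): # O(m*n*len(arr)), m*n to find the index of the element in the matrix, len(arr) to find the index of the element in the array
--     m=len(mat)
--     n=len(mat[0])
--     dummy=[[0]*n for _ in range(m)]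
--     for i in range(len(arr)):
--         r,c=-1,-1
--         for j in range(m):
--             for k in range(n):
--                 if mat[j][k]==arr[i]:
--                     dummy[j][k]=1
--                     r,c=j,k
--                     break
--             if r!=-1:
--                 break
--
--         if isCompleted(dummy,r,c,m,n):
--             return i
--     return -1
-- ===== SOURCE B (Python) =====
-- def firstCompleteIndexBrute(arr, mat):
--     m = len(mat)
--     n = len(mat[0])
--     # position of the FIRST occurrence (row-major, first n columns) of each value
--     pos = {}
--     for r in range(m):
--         row = mat[r]
--         for c in range(n):
--             v = row[c]
--             if v not in pos:
--                 pos[v] = (r, c)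
--     rowCnt = [0] * m
--     colCnt = [0] * n
--     painted = set()
--     for i in range(len(arr)):
--         p = pos.get(arr[i])
--         if p is not None and p not in painted:
--             painted.add(p)
--             r, c = p
--             rowCnt[r] += 1
--             colCnt[c] += 1
--             if rowCnt[r] == n or colCnt[c] == m:
--                 return i
--     return -1
-- ===== Notes on version B (the rewrite author's own statement) =====
-- stated objective: faster
-- what changed: Replaces A's per-element row-major matrix scan and full row/column completeness rescan by a value->position dictionary built once plus a painted-cell set with incremental row/column counters and an O(1) completeness test per element.
-- outside the precondition, e.g. on firstCompleteIndexBrute([1], [[1, 2], [3]]): A returns -1, B raises IndexError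
import Mathlib
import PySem

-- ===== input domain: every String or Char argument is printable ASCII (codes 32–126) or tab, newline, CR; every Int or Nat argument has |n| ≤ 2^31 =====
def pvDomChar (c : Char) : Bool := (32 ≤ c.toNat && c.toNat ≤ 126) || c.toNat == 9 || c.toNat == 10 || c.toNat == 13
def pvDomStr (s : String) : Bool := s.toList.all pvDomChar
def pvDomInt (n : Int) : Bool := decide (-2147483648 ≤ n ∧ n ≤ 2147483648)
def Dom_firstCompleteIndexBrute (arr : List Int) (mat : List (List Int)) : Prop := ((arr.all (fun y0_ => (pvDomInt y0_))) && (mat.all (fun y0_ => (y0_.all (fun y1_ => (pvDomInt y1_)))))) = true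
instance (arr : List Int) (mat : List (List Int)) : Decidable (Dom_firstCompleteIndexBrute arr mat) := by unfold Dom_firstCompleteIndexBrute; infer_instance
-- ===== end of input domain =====

-- B replaces A's per-element O(m*n) matrix scan and O(m+n) completion scan by a
-- position dictionary built once plus incremental painted row/column counters.

-- ===== PORT A =====
-- isCompleted(mat,r,c,m,n): the two early-break boolean scans (row r complete or column c complete)
def pvIsCompleted (dummy : List (List Int)) (r c : Int) (m n : Nat) : Bool :=
  ((PySem.List.pyRange 0 (n : Int) 1).all
      (fun j => !(PySem.List.pyGetD (PySem.List.pyGetD dummy r []) j 0 == 0))) ||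
  ((PySem.List.pyRange 0 (m : Int) 1).all
      (fun j => !(PySem.List.pyGetD (PySem.List.pyGetD dummy j []) c 0 == 0)))

-- inner loop 'for k in range(n): if mat[j][k]==v: … break' (first matching column)
def pvFindInRow (row : List Int) (v : Int) (n : Nat) : Option Nat :=
  (List.range n).find? (fun k => row.getD k 0 == v)

-- the nested search loops with their two breaks: first (j,k) in row-major order with mat[j][k]==v
def pvSearch (rows : List (List Int)) (j : Nat) (v : Int) (n : Nat) : Option (Nat × Nat) :=
  match rows with
  | [] => none
  | row :: rest =>
    match pvFindInRow row v n with
    | some k => some (j, k)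
    | none => pvSearch rest (j + 1) v n

-- dummy[j][k] = 1
def pvPaint (dummy : List (List Int)) (j k : Nat) : List (List Int) :=
  dummy.set j ((dummy.getD j []).set k 1)

-- the main 'for i in range(len(arr))' loop with its early return
def pvLoopA (mat : List (List Int)) (m n : Nat) : List Int → List (List Int) → Nat → Int
  | [], _, _ => -1
  | v :: rest, dummy, i =>
    match pvSearch mat 0 v n with
    | some (j, k) =>
      let dummy' := pvPaint dummy j k
      if pvIsCompleted dummy' (j : Int) (k : Int) m n then (i : Int)
      else pvLoopA mat m n rest dummy' (i + 1)
    | none =>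
      if pvIsCompleted dummy (-1) (-1) m n then (i : Int)
      else pvLoopA mat m n rest dummy (i + 1)

def firstCompleteIndexBrute (arr : List Int) (mat : List (List Int)) : Int :=
  let m := mat.length
  let n := mat.headI.length   -- len(mat[0]); mat = [] raises IndexError (excluded by Pre_)
  pvLoopA mat m n arr (List.replicate m (List.replicate n 0)) 0

-- ===== PORT B =====
-- inner 'for c in range(n): if v not in pos: pos[v] = (r, c)'
def pvRowInsert (row : List Int) (r n : Nat) (pos : PySem.Dict Int (Nat × Nat)) :
    PySem.Dict Int (Nat × Nat) :=
  (List.range n).foldl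
    (fun p c => if p.contains (row.getD c 0) then p else p.insert (row.getD c 0) (r, c)) pos

-- 'for r in range(m): …' building the first-occurrence position dictionary
def pvBuildPos (rows : List (List Int)) (r n : Nat) (pos : PySem.Dict Int (Nat × Nat)) :
    PySem.Dict Int (Nat × Nat) :=
  match rows with
  | [] => pos
  | row :: rest => pvBuildPos rest (r + 1) n (pvRowInsert row r n pos)

-- B's main loop: dictionary lookup, painted set, incremental row/column counters
def pvLoopB (pos : PySem.Dict Int (Nat × Nat)) (m n : Nat) :
    List Int → PySem.Set (Nat × Nat) → List Nat → List Nat → Nat → Int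
  | [], _, _, _, _ => -1
  | v :: rest, painted, rowCnt, colCnt, i =>
    match pos.get? v with
    | none => pvLoopB pos m n rest painted rowCnt colCnt (i + 1)
    | some p =>
      if PySem.Set.contains painted p then pvLoopB pos m n rest painted rowCnt colCnt (i + 1)
      else
        let painted' := PySem.Set.add painted p
        let rowCnt' := rowCnt.set p.1 (rowCnt.getD p.1 0 + 1)
        let colCnt' := colCnt.set p.2 (colCnt.getD p.2 0 + 1)
        if rowCnt'.getD p.1 0 == n || colCnt'.getD p.2 0 == m then (i : Int)
        else pvLoopB pos m n rest painted' rowCnt' colCnt' (i + 1)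

def firstCompleteIndexBrute_alt (arr : List Int) (mat : List (List Int)) : Int :=
  let m := mat.length
  let n := mat.headI.length
  pvLoopB (pvBuildPos mat 0 n PySem.Dict.empty) m n arr PySem.Set.empty
    (List.replicate m 0) (List.replicate n 0) 0

-- ===== PRECONDITION & SPEC =====
-- Pre_ excludes ragged matrices (a row shorter than len(mat[0]): A raises unless its early
-- breaks happen to skip the short row, an accident of scan order, while B always scans it and
-- raises), the empty matrix (A raises on mat[0]), and zero-width rows with nonempty arr
-- (A raises IndexError inside isCompleted).
def Pre_firstCompleteIndexBrute (arr : List Int) (mat : List (List Int)) : Prop :=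
  mat ≠ [] ∧ (arr = [] ∨ mat.headI ≠ []) ∧ ∀ row ∈ mat, mat.headI.length ≤ row.length
instance (arr : List Int) (mat : List (List Int)) : Decidable (Pre_firstCompleteIndexBrute arr mat) := by unfold Pre_firstCompleteIndexBrute; infer_instance

def pvWitness_firstCompleteIndexBrute : List Int × List (List Int) :=
  ([1, 2, 3, 4], [[1, 2], [3, 4]])

def Spec_firstCompleteIndexBrute (arr : List Int) (mat : List (List Int)) (out : Int) : Prop := out = firstCompleteIndexBrute_alt arr mat
instance (arr : List Int) (mat : List (List Int)) (out : Int) : Decidable (Spec_firstCompleteIndexBrute arr mat out) := by unfold Spec_firstCompleteIndexBrute; infer_instance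

-- ===== CLAIM (what is proved, stated in full; the proofs are below) =====
def Claim_equal_firstCompleteIndexBrute : Prop := ∀ (arr : List Int) (mat : List (List Int)), Dom_firstCompleteIndexBrute arr mat → Pre_firstCompleteIndexBrute arr mat → Spec_firstCompleteIndexBrute arr mat (firstCompleteIndexBrute arr mat)

-- ===== LEMMAS AND PROOFS =====

-- abstract state: the set P of painted cells determines A's dummy grid and B's counters
def pvGrid (m n : Nat) (P : List (Nat × Nat)) : List (List Int) :=
  (List.range m).map fun j => (List.range n).map fun k => if (j, k) ∈ P then (1 : Int) else 0

def pvRCnt (m : Nat) (P : List (Nat × Nat)) : List Nat :=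
  (List.range m).map fun j => P.countP fun p => p.1 == j

def pvCCnt (n : Nat) (P : List (Nat × Nat)) : List Nat :=
  (List.range n).map fun k => P.countP fun p => p.2 == k

def pvGood (m n : Nat) (P : List (Nat × Nat)) : Prop :=
  P.Nodup ∧ ∀ p ∈ P, p.1 < m ∧ p.2 < n

def pvNoFull (m n : Nat) (P : List (Nat × Nat)) : Prop :=
  (∀ j < m, ∃ k < n, (j, k) ∉ P) ∧ (∀ k < n, ∃ j < m, (j, k) ∉ P)

lemma pvGrid_getD (m n : Nat) (P : List (Nat × Nat)) (j : Nat) (hj : j < m) :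
    (pvGrid m n P).getD j [] = (List.range n).map fun k => if (j, k) ∈ P then (1 : Int) else 0 := by
  simp [pvGrid, List.getD_eq_getElem?_getD, hj]

lemma pvGrid_cell (m n : Nat) (P : List (Nat × Nat)) (j t : Nat) (hj : j < m) (ht : t < n) :
    ((pvGrid m n P).getD j []).getD t 0 = if (j, t) ∈ P then (1 : Int) else 0 := by
  rw [pvGrid_getD m n P j hj]
  simp [List.getD_eq_getElem?_getD, ht]

lemma pvRowMap_getD (m n : Nat) (P : List (Nat × Nat)) (j t : Nat) (ht : t < n) :
    ((List.range n).map fun k => if (j, k) ∈ P then (1 : Int) else 0).getD t 0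
      = if (j, t) ∈ P then (1 : Int) else 0 := by
  simp [List.getD_eq_getElem?_getD, ht]

lemma pvIsCompleted_grid (m n : Nat) (P : List (Nat × Nat)) (j k : Nat)
    (hj : j < m) (hk : k < n) :
    (pvIsCompleted (pvGrid m n P) (j : Int) (k : Int) m n = true)
      ↔ ((∀ t < n, (j, t) ∈ P) ∨ (∀ t < m, (t, k) ∈ P)) := by
  unfold pvIsCompleted
  rw [PySem.List.pyRange_zero_natCast n, PySem.List.pyRange_zero_natCast m, List.all_map,
    List.all_map, Bool.or_eq_true, List.all_eq_true, List.all_eq_true]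
  apply or_congr
  · constructor
    · intro h t ht
      have h2 := h t (List.mem_range.mpr ht)
      simp only [Function.comp, PySem.List.pyGetD_natCast, pvGrid_cell m n P j t hj ht] at h2
      by_contra hmem
      simp [hmem] at h2
    · intro h t ht
      have ht' := List.mem_range.mp ht
      simp only [Function.comp, PySem.List.pyGetD_natCast, pvGrid_cell m n P j t hj ht',
        h t ht']
      decide
  · constructor
    · intro h t ht
      have h2 := h t (List.mem_range.mpr ht)
      simp only [Function.comp, PySem.List.pyGetD_natCast, pvGrid_cell m n P t k ht hk] at h2
      by_contra hmem
      simp [hmem] at h2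
    · intro h t ht
      have ht' := List.mem_range.mp ht
      simp only [Function.comp, PySem.List.pyGetD_natCast, pvGrid_cell m n P t k ht' hk,
        h t ht']
      decide

lemma pvIsCompleted_grid_neg (m n : Nat) (P : List (Nat × Nat)) (hm : 0 < m) (hn : 0 < n) :
    (pvIsCompleted (pvGrid m n P) (-1) (-1) m n = true)
      ↔ ((∀ t < n, (m - 1, t) ∈ P) ∨ (∀ t < m, (t, n - 1) ∈ P)) := by
  have hne : pvGrid m n P ≠ [] := by
    simp [pvGrid]; omega
  have h1 : PySem.List.pyGetD (pvGrid m n P) (-1) []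
      = (List.range n).map fun k => if (m - 1, k) ∈ P then (1 : Int) else 0 := by
    rw [PySem.List.pyGetD_neg_one _ _ hne, List.getLast_eq_getElem]
    simp [pvGrid, List.getElem_map, List.getElem_range]
  have h2 : ∀ t : Nat, t < m →
      PySem.List.pyGetD ((pvGrid m n P).getD t []) (-1) 0
        = if (t, n - 1) ∈ P then (1 : Int) else 0 := by
    intro t ht
    rw [pvGrid_getD m n P t ht]
    have hne2 : ((List.range n).map fun k => if (t, k) ∈ P then (1 : Int) else 0) ≠ [] := by
      simp; omega
    rw [PySem.List.pyGetD_neg_one _ _ hne2, List.getLast_eq_getElem]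
    simp [List.getElem_map, List.getElem_range]
  unfold pvIsCompleted
  rw [PySem.List.pyRange_zero_natCast n, PySem.List.pyRange_zero_natCast m, List.all_map,
    List.all_map, Bool.or_eq_true, List.all_eq_true, List.all_eq_true]
  apply or_congr
  · constructor
    · intro h t ht
      have h3 := h t (List.mem_range.mpr ht)
      simp only [Function.comp, PySem.List.pyGetD_natCast, h1,
        pvRowMap_getD m n P (m - 1) t ht] at h3
      by_contra hmem
      simp [hmem] at h3
    · intro h t ht
      have ht2 := List.mem_range.mp ht
      simp only [Function.comp, PySem.List.pyGetD_natCast, h1,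
        pvRowMap_getD m n P (m - 1) t ht2, h t ht2]
      decide
  · constructor
    · intro h t ht
      have h3 := h t (List.mem_range.mpr ht)
      simp only [Function.comp, PySem.List.pyGetD_natCast, h2 t ht] at h3
      by_contra hmem
      simp [hmem] at h3
    · intro h t ht
      have ht2 := List.mem_range.mp ht
      simp only [Function.comp, PySem.List.pyGetD_natCast, h2 t ht2, h t ht2]
      decide

lemma pvFullAux (N : Nat) (l : List Nat) (hnd : l.Nodup) (hb : ∀ t ∈ l, t < N) :
    l.length = N ↔ ∀ t < N, t ∈ l := by
  have hS : l.toFinset ⊆ Finset.range N := by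
    intro t ht
    simp only [List.mem_toFinset] at ht
    exact Finset.mem_range.mpr (hb t ht)
  have hcard : l.toFinset.card = l.length := List.toFinset_card_of_nodup hnd
  constructor
  · intro h t ht
    have heq : l.toFinset = Finset.range N :=
      Finset.eq_of_subset_of_card_le hS (by simp [hcard, h])
    have : t ∈ l.toFinset := by rw [heq]; exact Finset.mem_range.mpr ht
    simpa using this
  · intro h
    have hsub2 : Finset.range N ⊆ l.toFinset := by
      intro t ht
      simp only [List.mem_toFinset]
      exact h t (Finset.mem_range.mp ht)
    have h1 := Finset.card_le_card hsub2
    have h2 := Finset.card_le_card hS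
    simp [hcard] at h1 h2
    omega

lemma pvCount_row_full (m n : Nat) (P : List (Nat × Nat)) (hnd : P.Nodup)
    (hb : ∀ p ∈ P, p.1 < m ∧ p.2 < n) (j : Nat) :
    (P.countP (fun p => p.1 == j) = n) ↔ ∀ t < n, (j, t) ∈ P := by
  have hmeml : ∀ p ∈ P.filter (fun p => p.1 == j), p.1 = j ∧ p ∈ P := by
    intro p hp
    rw [List.mem_filter] at hp
    exact ⟨by simpa using hp.2, hp.1⟩
  have hnd2 : ((P.filter (fun p => p.1 == j)).map Prod.snd).Nodup := by
    refine List.Nodup.map_on ?_ (hnd.filter _)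
    intro x hx y hy hxy
    obtain ⟨hx1, _⟩ := hmeml x hx
    obtain ⟨hy1, _⟩ := hmeml y hy
    obtain ⟨x1, x2⟩ := x
    obtain ⟨y1, y2⟩ := y
    simp_all
  have hbd : ∀ t ∈ (P.filter (fun p => p.1 == j)).map Prod.snd, t < n := by
    intro t ht
    rw [List.mem_map] at ht
    obtain ⟨p, hp, rfl⟩ := ht
    exact (hb p (hmeml p hp).2).2
  have key := pvFullAux n _ hnd2 hbd
  simp only [List.length_map] at key
  rw [List.countP_eq_length_filter, key]
  apply forall_congr'
  intro t
  apply imp_congr_right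
  intro _
  constructor
  · intro ht
    rw [List.mem_map] at ht
    obtain ⟨p, hp, rfl⟩ := ht
    obtain ⟨hp1, hp2⟩ := hmeml p hp
    obtain ⟨p1, p2⟩ := p
    simp only at hp1
    subst hp1
    exact hp2
  · intro ht
    rw [List.mem_map]
    exact ⟨(j, t), List.mem_filter.mpr ⟨ht, by simp⟩, rfl⟩

lemma pvCount_col_full (m n : Nat) (P : List (Nat × Nat)) (hnd : P.Nodup)
    (hb : ∀ p ∈ P, p.1 < m ∧ p.2 < n) (k : Nat) :
    (P.countP (fun p => p.2 == k) = m) ↔ ∀ t < m, (t, k) ∈ P := by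
  have hmeml : ∀ p ∈ P.filter (fun p => p.2 == k), p.2 = k ∧ p ∈ P := by
    intro p hp
    rw [List.mem_filter] at hp
    exact ⟨by simpa using hp.2, hp.1⟩
  have hnd2 : ((P.filter (fun p => p.2 == k)).map Prod.fst).Nodup := by
    refine List.Nodup.map_on ?_ (hnd.filter _)
    intro x hx y hy hxy
    obtain ⟨hx1, _⟩ := hmeml x hx
    obtain ⟨hy1, _⟩ := hmeml y hy
    obtain ⟨x1, x2⟩ := x
    obtain ⟨y1, y2⟩ := y
    simp_all
  have hbd : ∀ t ∈ (P.filter (fun p => p.2 == k)).map Prod.fst, t < m := by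
    intro t ht
    rw [List.mem_map] at ht
    obtain ⟨p, hp, rfl⟩ := ht
    exact (hb p (hmeml p hp).2).1
  have key := pvFullAux m _ hnd2 hbd
  simp only [List.length_map] at key
  rw [List.countP_eq_length_filter, key]
  apply forall_congr'
  intro t
  apply imp_congr_right
  intro _
  constructor
  · intro ht
    rw [List.mem_map] at ht
    obtain ⟨p, hp, rfl⟩ := ht
    obtain ⟨hp1, hp2⟩ := hmeml p hp
    obtain ⟨p1, p2⟩ := p
    simp only at hp1
    subst hp1
    exact hp2
  · intro ht
    rw [List.mem_map]
    exact ⟨(t, k), List.mem_filter.mpr ⟨ht, by simp⟩, rfl⟩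

lemma pvFoldInsert_get? (row : List Int) (r : Nat) (v : Int) :
    ∀ (ks : List Nat) (pos : PySem.Dict Int (Nat × Nat)),
    ((ks.foldl (fun p c => if p.contains (row.getD c 0) then p
                           else p.insert (row.getD c 0) (r, c)) pos).get? v)
      = (pos.get? v).or ((ks.find? (fun k => row.getD k 0 == v)).map (fun k => (r, k))) := by
  intro ks
  induction ks with
  | nil => intro pos; simp
  | cons k ks ih =>
    intro pos
    rw [List.foldl_cons]
    by_cases hv : row.getD k 0 = v
    · have hfind : List.find? (fun k => row.getD k 0 == v) (k :: ks) = some k :=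
        List.find?_cons_of_pos (by simpa using hv)
      rw [hfind]
      by_cases hc : pos.contains (row.getD k 0) = true
      · rw [if_pos hc, ih]
        obtain ⟨w, hw⟩ : ∃ w, pos.get? v = some w := by
          cases hg : pos.get? v with
          | none =>
            rw [PySem.Dict.get?_eq_none_iff_contains] at hg
            rw [hv] at hc
            rw [hg] at hc
            cases hc
          | some w => exact ⟨w, rfl⟩
        rw [hw]
        simp
      · rw [if_neg hc, ih]
        have hvp : pos.get? v = none := by
          rw [PySem.Dict.get?_eq_none_iff_contains]
          rw [hv] at hc
          simpa using hc
        rw [hvp, PySem.Dict.get?_insert, if_pos hv.symm]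
        simp
    · have hfind : List.find? (fun k => row.getD k 0 == v) (k :: ks)
          = List.find? (fun k => row.getD k 0 == v) ks :=
        List.find?_cons_of_neg (by simpa using hv)
      rw [hfind]
      by_cases hc : pos.contains (row.getD k 0) = true
      · rw [if_pos hc, ih]
      · rw [if_neg hc, ih, PySem.Dict.get?_insert,
          if_neg (fun h : v = row.getD k 0 => hv h.symm)]

lemma pvSearch_cons (row : List Int) (rest : List (List Int)) (r : Nat) (v : Int) (n : Nat) :
    pvSearch (row :: rest) r v n
      = ((pvFindInRow row v n).map (fun k => (r, k))).or (pvSearch rest (r + 1) v n) := by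
  cases h : pvFindInRow row v n <;> simp [pvSearch, h]

lemma pvBuildPos_get? (n : Nat) (v : Int) :
    ∀ (rows : List (List Int)) (r : Nat) (pos : PySem.Dict Int (Nat × Nat)),
    (pvBuildPos rows r n pos).get? v = (pos.get? v).or (pvSearch rows r v n) := by
  intro rows
  induction rows with
  | nil => intro r pos; simp [pvBuildPos, pvSearch]
  | cons row rest ih =>
    intro r pos
    rw [pvBuildPos, ih, pvSearch_cons]
    rw [pvRowInsert, pvFoldInsert_get?]
    rw [Option.or_assoc]
    rfl

lemma pvPos_eq_search (mat : List (List Int)) (n : Nat) (v : Int) :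
    (pvBuildPos mat 0 n PySem.Dict.empty).get? v = pvSearch mat 0 v n := by
  rw [pvBuildPos_get?]
  simp

lemma pvSearch_bounds (v : Int) (n : Nat) :
    ∀ (rows : List (List Int)) (r : Nat) (j k : Nat),
    pvSearch rows r v n = some (j, k) → r ≤ j ∧ j < r + rows.length ∧ k < n := by
  intro rows
  induction rows with
  | nil => intro r j k h; cases h
  | cons row rest ih =>
    intro r j k h
    rw [pvSearch] at h
    cases hf : pvFindInRow row v n with
    | some k0 =>
      rw [hf] at h
      simp only [Option.some.injEq, Prod.mk.injEq] at h
      obtain ⟨hj, hk⟩ := h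
      have hk0 : k0 < n := by
        have := List.mem_of_find?_eq_some hf
        simpa using this
      simp only [List.length_cons]
      omega
    | none =>
      rw [hf] at h
      obtain ⟨h1, h2, h3⟩ := ih (r + 1) j k h
      simp only [List.length_cons]
      refine ⟨by omega, by omega, h3⟩

lemma pvPaint_grid (m n : Nat) (P : List (Nat × Nat)) (j k : Nat) (hj : j < m) (hk : k < n) :
    pvPaint (pvGrid m n P) j k = pvGrid m n (PySem.Set.add P (j, k)) := by
  apply List.ext_getElem
  · simp [pvPaint, pvGrid]
  intro i hi hi'
  simp only [pvPaint, List.getElem_set]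
  simp only [pvGrid_getD m n P j hj]
  simp only [pvGrid, List.getElem_map, List.getElem_range]
  by_cases h : j = i
  · subst h
    rw [if_pos rfl]
    apply List.ext_getElem
    · simp
    intro t ht ht'
    simp only [List.getElem_set, List.getElem_map, List.getElem_range]
    by_cases h2 : k = t
    · subst h2
      simp [PySem.Set.mem_add]
    · rw [if_neg h2]
      have hmemiff : ((j, t) ∈ PySem.Set.add P (j, k)) ↔ (j, t) ∈ P := by
        rw [PySem.Set.mem_add]
        constructor
        · rintro (hp | hp)
          · exact hp
          · exact absurd (congrArg Prod.snd hp).symm h2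
        · exact Or.inl
      simp [hmemiff]
  · rw [if_neg h]
    apply List.map_congr_left
    intro t ht
    have hmemiff : ((i, t) ∈ PySem.Set.add P (j, k)) ↔ (i, t) ∈ P := by
      rw [PySem.Set.mem_add]
      constructor
      · rintro (hp | hp)
        · exact hp
        · exact absurd (congrArg Prod.fst hp).symm h
      · exact Or.inl
    simp [hmemiff]

lemma pvRCnt_getD (m : Nat) (P : List (Nat × Nat)) (j : Nat) (hj : j < m) :
    (pvRCnt m P).getD j 0 = P.countP fun p => p.1 == j := by
  simp [pvRCnt, List.getD_eq_getElem?_getD, hj]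

lemma pvCCnt_getD (n : Nat) (P : List (Nat × Nat)) (k : Nat) (hk : k < n) :
    (pvCCnt n P).getD k 0 = P.countP fun p => p.2 == k := by
  simp [pvCCnt, List.getD_eq_getElem?_getD, hk]

lemma pvRCnt_set (m : Nat) (P : List (Nat × Nat)) (j k : Nat) (hj : j < m) :
    (pvRCnt m P).set j ((pvRCnt m P).getD j 0 + 1) = pvRCnt m (P ++ [(j, k)]) := by
  apply List.ext_getElem
  · simp [pvRCnt]
  intro i hi hi'
  simp only [pvRCnt, List.getElem_set, List.getElem_map, List.getElem_range]
  rw [List.countP_append]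
  by_cases h : j = i
  · subst h
    simp [pvRCnt, List.getD_eq_getElem?_getD, hj, List.countP_cons]
  · simp [h, List.countP_cons, Ne.symm h]

lemma pvCCnt_set (n : Nat) (P : List (Nat × Nat)) (j k : Nat) (hk : k < n) :
    (pvCCnt n P).set k ((pvCCnt n P).getD k 0 + 1) = pvCCnt n (P ++ [(j, k)]) := by
  apply List.ext_getElem
  · simp [pvCCnt]
  intro i hi hi'
  simp only [pvCCnt, List.getElem_set, List.getElem_map, List.getElem_range]
  rw [List.countP_append]
  by_cases h : k = i
  · subst h
    simp [pvCCnt, List.getD_eq_getElem?_getD, hk, List.countP_cons]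
  · simp [h, List.countP_cons, Ne.symm h]

lemma pvGrid_nil (m n : Nat) : pvGrid m n [] = List.replicate m (List.replicate n 0) := by
  simp [pvGrid]

lemma pvRCnt_nil (m : Nat) : pvRCnt m [] = List.replicate m 0 := by
  simp [pvRCnt]

lemma pvCCnt_nil (n : Nat) : pvCCnt n [] = List.replicate n 0 := by
  simp [pvCCnt]

lemma pvNoFull_append (m n : Nat) (P : List (Nat × Nat)) (j k : Nat) (hP : pvNoFull m n P)
    (h1 : ¬ ∀ t < n, (j, t) ∈ P ++ [(j, k)]) (h2 : ¬ ∀ t < m, (t, k) ∈ P ++ [(j, k)]) :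
    pvNoFull m n (P ++ [(j, k)]) := by
  push_neg at h1 h2
  obtain ⟨t1, ht1, hm1⟩ := h1
  obtain ⟨t2, ht2, hm2⟩ := h2
  constructor
  · intro j' hj'
    by_cases h : j' = j
    · subst h; exact ⟨t1, ht1, hm1⟩
    · obtain ⟨kk, hkk, hnm⟩ := hP.1 j' hj'
      refine ⟨kk, hkk, ?_⟩
      simp only [List.mem_append, List.mem_singleton]
      rintro (hin | hin)
      · exact hnm hin
      · exact h (congrArg Prod.fst hin)
  · intro k' hk'
    by_cases h : k' = k
    · subst h; exact ⟨t2, ht2, hm2⟩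
    · obtain ⟨jj, hjj, hnm⟩ := hP.2 k' hk'
      refine ⟨jj, hjj, ?_⟩
      simp only [List.mem_append, List.mem_singleton]
      rintro (hin | hin)
      · exact hnm hin
      · exact h (congrArg Prod.snd hin)

lemma pvLoop_eq (mat : List (List Int)) (m n : Nat) (hm : 0 < m) (hn : 0 < n)
    (hmat : m = mat.length) :
    ∀ (arr : List Int) (P : List (Nat × Nat)) (i : Nat),
      pvGood m n P → pvNoFull m n P →
      pvLoopA mat m n arr (pvGrid m n P) i
        = pvLoopB (pvBuildPos mat 0 n PySem.Dict.empty) m n arr P (pvRCnt m P) (pvCCnt n P) i := by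
  intro arr
  induction arr with
  | nil => intro P i _ _; rfl
  | cons v rest ih =>
    intro P i hGood hNF
    rw [pvLoopA, pvLoopB, pvPos_eq_search]
    cases hs : pvSearch mat 0 v n with
    | none =>
      dsimp only []
      have hcomp : ¬ (pvIsCompleted (pvGrid m n P) (-1) (-1) m n = true) := by
        rw [pvIsCompleted_grid_neg m n P hm hn]
        push_neg
        exact ⟨hNF.1 (m - 1) (by omega), hNF.2 (n - 1) (by omega)⟩
      rw [if_neg hcomp]
      exact ih P (i + 1) hGood hNF
    | some p =>
      obtain ⟨j, k⟩ := p
      dsimp only []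
      obtain ⟨-, hjlt, hk⟩ := pvSearch_bounds v n mat 0 j k hs
      have hj : j < m := by omega
      by_cases hmem : (j, k) ∈ P
      · have hcont : PySem.Set.contains P (j, k) = true :=
          (PySem.Set.contains_iff P (j, k)).mpr hmem
        rw [if_pos hcont]
        have hadd : PySem.Set.add P (j, k) = P := by
          simp [PySem.Set.add, hmem]
        rw [pvPaint_grid m n P j k hj hk, hadd]
        have hcomp : ¬ (pvIsCompleted (pvGrid m n P) (j : Int) (k : Int) m n = true) := by
          rw [pvIsCompleted_grid m n P j k hj hk]
          push_neg
          exact ⟨hNF.1 j hj, hNF.2 k hk⟩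
        rw [if_neg hcomp]
        exact ih P (i + 1) hGood hNF
      · rw [if_neg (fun hc => hmem ((PySem.Set.contains_iff P (j, k)).mp hc))]
        have hadd : PySem.Set.add P (j, k) = P ++ [(j, k)] := by
          simp [PySem.Set.add, hmem]
        have hGood' : pvGood m n (P ++ [(j, k)]) := by
          constructor
          · rw [List.nodup_append]
            refine ⟨hGood.1, List.nodup_singleton _, ?_⟩
            intro a ha b hb
            rw [List.mem_singleton] at hb
            subst hb
            intro heq
            exact hmem (heq ▸ ha)
          · intro p hp
            rcases List.mem_append.mp hp with hp | hp
            · exact hGood.2 p hp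
            · rw [List.mem_singleton] at hp
              subst hp
              exact ⟨hj, hk⟩
        rw [pvPaint_grid m n P j k hj hk, hadd]
        rw [pvRCnt_set m P j k hj, pvCCnt_set n P j k hk,
          pvRCnt_getD m (P ++ [(j, k)]) j hj, pvCCnt_getD n (P ++ [(j, k)]) k hk]
        have hcond : pvIsCompleted (pvGrid m n (P ++ [(j, k)])) (j : Int) (k : Int) m n
            = (((P ++ [(j, k)]).countP (fun p => p.1 == j) == n)
               || ((P ++ [(j, k)]).countP (fun p => p.2 == k) == m)) := by
          rw [Bool.eq_iff_iff, Bool.or_eq_true, beq_iff_eq, beq_iff_eq,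
            pvIsCompleted_grid m n (P ++ [(j, k)]) j k hj hk,
            pvCount_row_full m n (P ++ [(j, k)]) hGood'.1 hGood'.2 j,
            pvCount_col_full m n (P ++ [(j, k)]) hGood'.1 hGood'.2 k]
        rw [hcond]
        cases hfull : (((P ++ [(j, k)]).countP (fun p => p.1 == j) == n)
               || ((P ++ [(j, k)]).countP (fun p => p.2 == k) == m)) with
        | true => rfl
        | false =>
          rw [Bool.or_eq_false_iff] at hfull
          have hb1 : ¬ ∀ t < n, (j, t) ∈ P ++ [(j, k)] := by
            rw [← pvCount_row_full m n (P ++ [(j, k)]) hGood'.1 hGood'.2 j]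
            simpa using hfull.1
          have hb2 : ¬ ∀ t < m, (t, k) ∈ P ++ [(j, k)] := by
            rw [← pvCount_col_full m n (P ++ [(j, k)]) hGood'.1 hGood'.2 k]
            simpa using hfull.2
          exact ih (P ++ [(j, k)]) (i + 1) hGood' (pvNoFull_append m n P j k hNF hb1 hb2)

-- ===== VERDICT (by name: the statement is the Claim_ definition above) =====
theorem firstCompleteIndexBrute_spec : Claim_equal_firstCompleteIndexBrute := by
  unfold Claim_equal_firstCompleteIndexBrute
  intro arr mat _ hpre
  unfold Spec_firstCompleteIndexBrute
  obtain ⟨hne, hor, -⟩ := hpre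
  unfold firstCompleteIndexBrute firstCompleteIndexBrute_alt
  cases arr with
  | nil => rfl
  | cons v rest =>
    have hm : 0 < mat.length := List.length_pos_iff.mpr hne
    have hn : 0 < mat.headI.length := by
      cases hor with
      | inl h => cases h
      | inr h => exact List.length_pos_iff.mpr h
    show pvLoopA mat mat.length mat.headI.length (v :: rest)
        (List.replicate mat.length (List.replicate mat.headI.length 0)) 0
      = pvLoopB (pvBuildPos mat 0 mat.headI.length PySem.Dict.empty) mat.length
          mat.headI.length (v :: rest) PySem.Set.empty (List.replicate mat.length 0)
          (List.replicate mat.headI.length 0) 0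
    rw [← pvGrid_nil mat.length mat.headI.length, ← pvRCnt_nil mat.length,
      ← pvCCnt_nil mat.headI.length]
    exact pvLoop_eq mat mat.length mat.headI.length hm hn rfl (v :: rest) [] 0
      ⟨List.nodup_nil, by simp⟩
      ⟨fun j hj => ⟨0, hn, by simp⟩, fun k hk => ⟨0, hm, by simp⟩⟩
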